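-- pv_equiv track=rewrite | github.com/lakiw/pcfg_cracker | lib_trainer/future_research/monte_carlo.py | extract_lds
-- ===== SOURCE A (Python) =====
-- def split_ado(string):
--     """
--     a replacement for re
--     :param string: any string
--     :return: alpha, digit, other parts in a list
--     """
--     prev_chr_type = None
--     acc = ""
--     parts = []
--     for c in string:
--         if c.isalpha():
--             cur_chr_type = "alpha"
--         elif c.isdigit():
--             cur_chr_type = "digit"
--         else:
--             cur_chr_type = "other"
--         if prev_chr_type is None:
--             acc = c
--         elif prev_chr_type == cur_chr_type:
--             acc += c
--         else:
--             parts.append(acc)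
--             acc = c
--         prev_chr_type = cur_chr_type
--     parts.append(acc)
--     return parts
--
-- def extract_lds(pwd: str) -> str:
--     segs = split_ado(pwd)
--     ret = ""
--     for seg in segs:
--         if seg.isalpha():
--             ret += ("L" * len(seg))
--         elif seg.isdigit():
--             ret += ("D" * len(seg))
--         else:
--             ret += ("S" * len(seg))
--         pass
--     return ret
--     pass
-- ===== SOURCE B (Python) =====
-- def extract_lds(pwd: str) -> str:
--     return "".join(
--         "L" if c.isalpha() else "D" if c.isdigit() else "S"
--         for c in pwd
--     )
-- ===== Notes on version B (the rewrite author's own statement) =====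
-- stated objective: simpler
-- what changed: Replaces A's two-pass run-grouping state machine (group characters into alpha/digit/other runs, then expand each run by its length) with a direct single-pass per-character classification joined into the result string.
import Mathlib
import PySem

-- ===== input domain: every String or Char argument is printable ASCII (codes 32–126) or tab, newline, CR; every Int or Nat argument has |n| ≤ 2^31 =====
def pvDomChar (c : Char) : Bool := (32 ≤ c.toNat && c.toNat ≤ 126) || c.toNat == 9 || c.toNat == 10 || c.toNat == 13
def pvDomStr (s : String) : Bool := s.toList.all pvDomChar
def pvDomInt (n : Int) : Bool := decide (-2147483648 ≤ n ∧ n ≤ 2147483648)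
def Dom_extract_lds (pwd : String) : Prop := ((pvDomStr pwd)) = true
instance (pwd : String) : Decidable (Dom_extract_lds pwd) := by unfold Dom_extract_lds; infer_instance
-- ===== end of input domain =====

-- B replaces A's two-pass run-grouping-and-expanding with a direct per-character L/D/S map (simpler).

-- ===== PORT A =====
-- helper: split_ado, the run-grouping state machine; state = (prev_chr_type, acc, parts)
def splitAdoStep (st : Option String × List Char × List (List Char)) (c : Char) :
    Option String × List Char × List (List Char) :=
  let cur : String :=
    if PySem.Chars.isalpha c then "alpha"
    else if PySem.Chars.isdigit c then "digit"
    else "other"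
  match st with
  | (none, _, parts) => (some cur, [c], parts)
  | (some p, acc, parts) =>
    if p == cur then (some cur, acc ++ [c], parts)
    else (some cur, [c], parts ++ [acc])

def split_ado (s : String) : List (List Char) :=
  let st := s.toList.foldl splitAdoStep (none, [], [])
  st.2.2 ++ [st.2.1]

def extract_lds (pwd : String) : String :=
  let segs := split_ado pwd
  let ret := segs.foldl (fun ret seg =>
    if PySem.Chars.strIsalpha seg then ret ++ List.replicate seg.length 'L'
    else if PySem.Chars.strIsdigit seg then ret ++ List.replicate seg.length 'D'
    else ret ++ List.replicate seg.length 'S') []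
  String.mk ret

-- ===== PORT B =====
def ldsChar (c : Char) : Char :=
  if PySem.Chars.isalpha c then 'L'
  else if PySem.Chars.isdigit c then 'D'
  else 'S'

def extract_lds_alt (pwd : String) : String :=
  String.mk (pwd.toList.map ldsChar)

-- ===== PRECONDITION & SPEC =====
def Spec_extract_lds (pwd : String) (out : String) : Prop := out = extract_lds_alt pwd
instance (pwd : String) (out : String) : Decidable (Spec_extract_lds pwd out) := by unfold Spec_extract_lds; infer_instance

-- ===== CLAIM (what is proved, stated in full; the proofs are below) =====
def Claim_equal_extract_lds : Prop := ∀ (pwd : String), Dom_extract_lds pwd → Spec_extract_lds pwd (extract_lds pwd)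

-- ===== LEMMAS AND PROOFS =====

-- the type-name A's state machine assigns to a character
def clsName (c : Char) : String :=
  if PySem.Chars.isalpha c then "alpha"
  else if PySem.Chars.isdigit c then "digit"
  else "other"

-- what A's second pass emits for one segment
def emitSeg (seg : List Char) : List Char :=
  if PySem.Chars.strIsalpha seg then List.replicate seg.length 'L'
  else if PySem.Chars.strIsdigit seg then List.replicate seg.length 'D'
  else List.replicate seg.length 'S'

lemma emitSeg_uniform (seg : List Char) (a : Char) (ha : a ∈ seg)
    (h : ∀ c ∈ seg, clsName c = clsName a) : emitSeg seg = seg.map ldsChar := by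
  have hne : seg ≠ [] := List.ne_nil_of_mem ha
  by_cases hA : PySem.Chars.isalpha a = true
  · have hall : ∀ c ∈ seg, PySem.Chars.isalpha c = true := by
      intro c hc
      have := h c hc
      simp [clsName, hA] at this
      by_contra hcna
      by_cases hd : PySem.Chars.isdigit c = true <;> simp [hcna, hd] at this
    have h1 : PySem.Chars.strIsalpha seg = true := by
      simp [PySem.Chars.strIsalpha, hne, List.all_eq_true]
      exact hall
    have hmap : seg.map ldsChar = List.replicate seg.length 'L' := by
      rw [List.map_eq_replicate_iff]
      intro x hx; simp [ldsChar, hall x hx]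
    simp [emitSeg, h1, hmap]
  · by_cases hD : PySem.Chars.isdigit a = true
    · have hall : ∀ c ∈ seg, PySem.Chars.isdigit c = true ∧ PySem.Chars.isalpha c = false := by
        intro c hc
        have := h c hc
        simp [clsName, hA, hD] at this
        by_cases hca : PySem.Chars.isalpha c = true
        · simp [hca] at this
        · by_cases hcd : PySem.Chars.isdigit c = true
          · exact ⟨hcd, by simp [hca]⟩
          · simp [hca, hcd] at this
      have h1 : PySem.Chars.strIsalpha seg = false := by
        simp [PySem.Chars.strIsalpha]
        intro hni
        exact ⟨a, ha, by simp [hA]⟩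
      have h2 : PySem.Chars.strIsdigit seg = true := by
        simp [PySem.Chars.strIsdigit, hne, List.all_eq_true]
        intro c hc; exact (hall c hc).1
      have hmap : seg.map ldsChar = List.replicate seg.length 'D' := by
        rw [List.map_eq_replicate_iff]
        intro x hx; simp [ldsChar, (hall x hx).1, (hall x hx).2]
      simp [emitSeg, h1, h2, hmap]
    · have hall : ∀ c ∈ seg, PySem.Chars.isdigit c = false ∧ PySem.Chars.isalpha c = false := by
        intro c hc
        have := h c hc
        simp [clsName, hA, hD] at this
        by_cases hca : PySem.Chars.isalpha c = true
        · simp [hca] at this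
        · by_cases hcd : PySem.Chars.isdigit c = true
          · simp [hca, hcd] at this
          · exact ⟨by simp [hcd], by simp [hca]⟩
      have h1 : PySem.Chars.strIsalpha seg = false := by
        simp [PySem.Chars.strIsalpha]
        intro hni
        exact ⟨a, ha, by simp [hA]⟩
      have h2 : PySem.Chars.strIsdigit seg = false := by
        simp [PySem.Chars.strIsdigit]
        intro hni
        exact ⟨a, ha, by simp [hD]⟩
      have hmap : seg.map ldsChar = List.replicate seg.length 'S' := by
        rw [List.map_eq_replicate_iff]
        intro x hx; simp [ldsChar, (hall x hx).1, (hall x hx).2]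
      simp [emitSeg, h1, h2, hmap]

-- the loop invariant: running the state machine from a uniform nonempty acc
lemma splitAdo_loop (l : List Char) : ∀ (a : Char) (acc : List Char) (parts : List (List Char)),
    a ∈ acc → (∀ c ∈ acc, clsName c = clsName a) →
    ((l.foldl splitAdoStep (some (clsName a), acc, parts)).2.2 ++
      [(l.foldl splitAdoStep (some (clsName a), acc, parts)).2.1]).flatMap emitSeg =
      parts.flatMap emitSeg ++ acc.map ldsChar ++ l.map ldsChar := by
  induction l with
  | nil =>
    intro a acc parts ha hu
    simp [emitSeg_uniform acc a ha hu]
  | cons c l ih =>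
    intro a acc parts ha hu
    have hcn : (if PySem.Chars.isalpha c = true then "alpha"
        else if PySem.Chars.isdigit c = true then "digit" else "other") = clsName c := rfl
    by_cases hc : clsName c = clsName a
    · have hstep : splitAdoStep (some (clsName a), acc, parts) c =
          (some (clsName a), acc ++ [c], parts) := by
        simp only [splitAdoStep]
        rw [hcn, hc, if_pos (by simp)]
      have hu' : ∀ x ∈ acc ++ [c], clsName x = clsName a := by
        intro x hx
        rcases List.mem_append.mp hx with hxx | hxx
        · exact hu x hxx
        · simp at hxx; subst hxx; exact hc
      rw [List.foldl_cons, hstep,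
        ih a (acc ++ [c]) parts (List.mem_append.mpr (.inl ha)) hu']
      simp
    · have hstep : splitAdoStep (some (clsName a), acc, parts) c =
          (some (clsName c), [c], parts ++ [acc]) := by
        simp only [splitAdoStep]
        rw [hcn, if_neg (by simpa using fun h => hc h.symm)]
      rw [List.foldl_cons, hstep,
        ih c [c] (parts ++ [acc]) (by simp) (by simp)]
      simp [emitSeg_uniform acc a ha hu]

lemma extract_eq (pwd : String) : extract_lds pwd = extract_lds_alt pwd := by
  unfold extract_lds extract_lds_alt split_ado
  have hf : (fun (ret seg : List Char) =>
      if PySem.Chars.strIsalpha seg then ret ++ List.replicate seg.length 'L'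
      else if PySem.Chars.strIsdigit seg then ret ++ List.replicate seg.length 'D'
      else ret ++ List.replicate seg.length 'S')
      = (fun ret seg => ret ++ emitSeg seg) := by
    funext ret seg; simp only [emitSeg]; split_ifs <;> rfl
  simp only [hf, PySem.List.foldl_append_eq_flatMap]
  rcases h : pwd.toList with _ | ⟨c, rest⟩
  · simp [emitSeg]
  · have h0 : splitAdoStep (none, [], []) c =
        (some (clsName c), [c], ([] : List (List Char))) := rfl
    have hloop := splitAdo_loop rest c [c] [] (by simp) (fun x hx => by simp at hx; rw [hx])
    rw [List.foldl_cons, h0]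
    simp [hloop]

-- ===== VERDICT (by name: the statement is the Claim_ definition above) =====
theorem extract_lds_spec : Claim_equal_extract_lds := by
  intro pwd _
  unfold Spec_extract_lds
  exact extract_eq pwd
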